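-- pv_equiv track=rewrite | github.com/sbnb-irb/chemical-checker | package/tests/chemicalchecker/util/pipeline/tasks_web/task_web_showtargets.py | __sort_alphabet
-- ===== SOURCE A (Python) =====
-- def __sort_alphabet(prots, showtarg_d):
--     def nonesorter(a):
--         if not a:
--             return ""
--         return a
--     P0 = []
--     P1 = []
--     for p in prots:
--         if p not in showtarg_d:
--             P1 += [(p, p)]
--         else:
--             P0 += [(p, showtarg_d[p][0])]
--     return [r[0] for r in sorted(P0, key=lambda tup: nonesorter(tup[1]))] + [r[0] for r in sorted(P1, key=lambda tup: nonesorter(tup[1]))]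
-- ===== SOURCE B (Python) =====
-- def __sort_alphabet(prots, showtarg_d):
--     def key(p):
--         if p in showtarg_d:
--             return (0, showtarg_d[p][0] or "")
--         return (1, p or "")
--     return sorted(prots, key=key)
-- ===== Notes on version B (the rewrite author's own statement) =====
-- stated objective: simpler
-- what changed: Replaced the explicit two-list partition, the two separate keyed sorts and the tuple bookkeeping by a single stable sort of prots under a composite (group-tag, label) key; stability reproduces A's within-group order and the 0/1 tag keeps in-dict proteins first.
import Mathlib
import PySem

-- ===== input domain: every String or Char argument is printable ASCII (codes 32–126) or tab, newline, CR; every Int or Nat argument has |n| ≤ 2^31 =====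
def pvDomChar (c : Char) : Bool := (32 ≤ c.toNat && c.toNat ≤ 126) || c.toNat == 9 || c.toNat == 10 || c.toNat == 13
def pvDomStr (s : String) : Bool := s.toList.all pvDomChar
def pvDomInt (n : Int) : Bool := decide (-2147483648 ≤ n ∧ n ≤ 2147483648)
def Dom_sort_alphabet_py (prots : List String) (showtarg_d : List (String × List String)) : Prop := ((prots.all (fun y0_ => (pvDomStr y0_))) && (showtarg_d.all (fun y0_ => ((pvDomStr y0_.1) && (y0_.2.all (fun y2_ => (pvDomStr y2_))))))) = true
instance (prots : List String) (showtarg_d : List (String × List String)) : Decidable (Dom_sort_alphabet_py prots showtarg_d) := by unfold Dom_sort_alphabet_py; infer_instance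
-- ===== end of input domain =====

-- B replaces A's explicit two-list partition and two separate keyed sorts by one stable
-- sort of prots under a composite (group-tag, label) key: simpler decomposition, same values.


-- ===== PORT A =====
-- inner 'def nonesorter(a)': on strings, falsy means ""
def pyNonesorter (a : String) : String := if a = "" then "" else a

def sort_alphabet_py (prots : List String) (showtarg_d : List (String × List String)) : List String :=
  let d := PySem.Dict.ofList showtarg_d
  let PP := prots.foldl
    (fun (acc : List (String × String) × List (String × String)) p =>
      if ¬ (d.contains p = true) then (acc.1, acc.2 ++ [(p, p)])
      else (acc.1 ++ [(p, ((d.getD p []).headD ""))], acc.2))   -- showtarg_d[p][0]; '.headD ""' is exact under Pre_ (the value list is nonempty)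
    ([], [])
  (PySem.List.sorted PP.1 (fun tup => pyNonesorter tup.2)).map (fun r => r.1)
    ++ (PySem.List.sorted PP.2 (fun tup => pyNonesorter tup.2)).map (fun r => r.1)

-- ===== PORT B =====
-- 'x or ""' on a string equals the None-safe key
def pyOrEmpty (a : String) : String := if a = "" then "" else a

def sort_alphabet_py_alt (prots : List String) (showtarg_d : List (String × List String)) : List String :=
  let d := PySem.Dict.ofList showtarg_d
  PySem.List.sorted2 prots
    (fun p => if d.contains p then (0 : Int) else 1)
    (fun p => if d.contains p then pyOrEmpty ((d.getD p []).headD "") else pyOrEmpty p)   -- '.headD ""' exact under Pre_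

-- ===== PRECONDITION & SPEC =====
-- Pre_ excludes exactly the inputs where Python A raises IndexError (a protein of prots mapped
-- by the dict to an EMPTY list, so showtarg_d[p][0] fails); B raises there too.
def Pre_sort_alphabet_py (prots : List String) (showtarg_d : List (String × List String)) : Prop :=
  ∀ p ∈ prots, (PySem.Dict.ofList showtarg_d).get? p ≠ some []
instance (prots : List String) (showtarg_d : List (String × List String)) : Decidable (Pre_sort_alphabet_py prots showtarg_d) := by unfold Pre_sort_alphabet_py; infer_instance

def pvWitness_sort_alphabet_py : List String × (List (String × List String)) :=
  (["b", "a", "z"], [("a", ["T1"]), ("q", ["T2"])])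

def Spec_sort_alphabet_py (prots : List String) (showtarg_d : List (String × List String)) (out : List String) : Prop := out = sort_alphabet_py_alt prots showtarg_d
instance (prots : List String) (showtarg_d : List (String × List String)) (out : List String) : Decidable (Spec_sort_alphabet_py prots showtarg_d out) := by unfold Spec_sort_alphabet_py; infer_instance

-- ===== CLAIM (what is proved, stated in full; the proofs are below) =====
def Claim_equal_sort_alphabet_py : Prop := ∀ (prots : List String) (showtarg_d : List (String × List String)), Dom_sort_alphabet_py prots showtarg_d → Pre_sort_alphabet_py prots showtarg_d → Spec_sort_alphabet_py prots showtarg_d (sort_alphabet_py prots showtarg_d)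

-- ===== LEMMAS AND PROOFS =====

-- A's accumulation loop builds the two filtered, tagged lists
theorem loopA_char (d : PySem.Dict String (List String)) (xs : List String)
    (A B : List (String × String)) :
    xs.foldl
      (fun (acc : List (String × String) × List (String × String)) p =>
        if ¬ (d.contains p = true) then (acc.1, acc.2 ++ [(p, p)])
        else (acc.1 ++ [(p, ((d.getD p []).headD ""))], acc.2)) (A, B)
    = (A ++ (xs.filter (fun p => d.contains p)).map (fun p => (p, ((d.getD p []).headD ""))),
       B ++ (xs.filter (fun p => !(d.contains p))).map (fun p => (p, p))) := by
  induction xs generalizing A B with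
  | nil => simp
  | cons x xs ih =>
    by_cases h : d.contains x = true
    · rw [List.foldl_cons, if_neg (by simp [h]), ih]
      simp [h]
    · rw [List.foldl_cons, if_pos (by simp [h]), ih]
      simp [h]

-- insertBy commutes with map when the order only looks through the map
theorem insertBy_map {α β : Type} (g : α → β) (before : β → β → Bool) (x : α) (ys : List α) :
    PySem.List.insertBy before (g x) (ys.map g)
      = (PySem.List.insertBy (fun a b => before (g a) (g b)) x ys).map g := by
  induction ys with
  | nil => simp [PySem.List.insertBy]
  | cons y ys ih =>
    by_cases h : before (g x) (g y) = true <;> simp [PySem.List.insertBy, h, ih]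

theorem foldl_insertBy_map {α β : Type} (g : α → β) (before : β → β → Bool)
    (xs : List α) (acc : List α) :
    (xs.map g).foldl (fun acc x => PySem.List.insertBy before x acc) (acc.map g)
      = (xs.foldl (fun acc x => PySem.List.insertBy (fun a b => before (g a) (g b)) x acc) acc).map g := by
  induction xs generalizing acc with
  | nil => simp
  | cons x xs ih =>
    simp only [List.map_cons, List.foldl_cons]
    rw [insertBy_map g before x acc, ih]

theorem insertBy_congr {α : Type} (before before' : α → α → Bool) (x : α) (ys : List α)
    (h : ∀ y ∈ ys, before x y = before' x y) :
    PySem.List.insertBy before x ys = PySem.List.insertBy before' x ys := by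
  induction ys with
  | nil => rfl
  | cons y ys ih =>
    have hy := h y (by simp)
    by_cases hb : before x y = true <;>
      simp [PySem.List.insertBy, hb, hy ▸ hb, ih (fun z hz => h z (by simp [hz]))]

theorem insertBy_append_left {α : Type} (before : α → α → Bool) (x : α) (A B : List α)
    (hB : ∀ b ∈ B, before x b = true) :
    PySem.List.insertBy before x (A ++ B) = PySem.List.insertBy before x A ++ B := by
  induction A with
  | nil =>
    cases B with
    | nil => rfl
    | cons b bs => simp [PySem.List.insertBy, hB b (by simp)]
  | cons a A ih =>
    by_cases h : before x a = true <;> simp [PySem.List.insertBy, h, ih]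

theorem insertBy_append_right {α : Type} (before : α → α → Bool) (x : α) (A B : List α)
    (hA : ∀ a ∈ A, before x a = false) :
    PySem.List.insertBy before x (A ++ B) = A ++ PySem.List.insertBy before x B := by
  induction A with
  | nil => rfl
  | cons a A ih =>
    simp [PySem.List.insertBy, hA a (by simp), ih (fun z hz => hA z (by simp [hz]))]

-- the tagged composite insertion sort splits into the two group sorts
theorem foldl_insert2_split {α : Type} (k1 : α → Int) (k2 : α → String)
    (h01 : ∀ x, k1 x = 0 ∨ k1 x = 1) (xs : List α) :
    ∀ (A B : List α), (∀ a ∈ A, k1 a = 0) → (∀ b ∈ B, k1 b = 1) →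
    xs.foldl (fun acc x => PySem.List.insertBy
        (fun a b => decide (k1 a < k1 b) || (!decide (k1 b < k1 a) && decide (k2 a < k2 b))) x acc)
      (A ++ B)
    = (xs.filter (fun x => k1 x == 0)).foldl
        (fun acc x => PySem.List.insertBy (fun a b => decide (k2 a < k2 b)) x acc) A
      ++ (xs.filter (fun x => k1 x == 1)).foldl
        (fun acc x => PySem.List.insertBy (fun a b => decide (k2 a < k2 b)) x acc) B := by
  induction xs with
  | nil => intro A B _ _; simp
  | cons x xs ih =>
    intro A B hA hB
    rcases h01 x with h0 | h1
    · have step : PySem.List.insertBy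
          (fun a b => decide (k1 a < k1 b) || (!decide (k1 b < k1 a) && decide (k2 a < k2 b))) x (A ++ B)
          = PySem.List.insertBy (fun a b => decide (k2 a < k2 b)) x A ++ B := by
        rw [insertBy_append_left _ x A B (fun b hb => by simp [h0, hB b hb])]
        rw [insertBy_congr
          (fun a b => decide (k1 a < k1 b) || (!decide (k1 b < k1 a) && decide (k2 a < k2 b)))
          (fun a b => decide (k2 a < k2 b)) x A (fun a ha => by simp [h0, hA a ha])]
      have hA' : ∀ a ∈ PySem.List.insertBy (fun a b => decide (k2 a < k2 b)) x A, k1 a = 0 := by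
        intro a ha
        rcases (PySem.List.mem_insertBy _ _ _ _).1 ha with rfl | ha'
        · exact h0
        · exact hA a ha'
      simp only [List.foldl_cons, step, List.filter_cons, h0]
      simpa using ih (PySem.List.insertBy (fun a b => decide (k2 a < k2 b)) x A) B hA' hB
    · have step : PySem.List.insertBy
          (fun a b => decide (k1 a < k1 b) || (!decide (k1 b < k1 a) && decide (k2 a < k2 b))) x (A ++ B)
          = A ++ PySem.List.insertBy (fun a b => decide (k2 a < k2 b)) x B := by
        rw [insertBy_append_right _ x A B (fun a ha => by simp [h1, hA a ha])]
        rw [insertBy_congr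
          (fun a b => decide (k1 a < k1 b) || (!decide (k1 b < k1 a) && decide (k2 a < k2 b)))
          (fun a b => decide (k2 a < k2 b)) x B (fun b hb => by simp [h1, hB b hb])]
      have hB' : ∀ b ∈ PySem.List.insertBy (fun a b => decide (k2 a < k2 b)) x B, k1 b = 1 := by
        intro b hb
        rcases (PySem.List.mem_insertBy _ _ _ _).1 hb with rfl | hb'
        · exact h1
        · exact hB b hb'
      simp only [List.foldl_cons, step, List.filter_cons, h1]
      simpa using ih A (PySem.List.insertBy (fun a b => decide (k2 a < k2 b)) x B) hA hB'

theorem foldl_insert_key_congr {α : Type} (k k' : α → String) (xs : List α) :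
    ∀ acc : List α, (∀ x ∈ xs, k x = k' x) → (∀ x ∈ acc, k x = k' x) →
    xs.foldl (fun acc x => PySem.List.insertBy (fun a b => decide (k a < k b)) x acc) acc
      = xs.foldl (fun acc x => PySem.List.insertBy (fun a b => decide (k' a < k' b)) x acc) acc := by
  induction xs with
  | nil => intro acc _ _; rfl
  | cons x xs ih =>
    intro acc hxs hacc
    have hx := hxs x (by simp)
    simp only [List.foldl_cons]
    rw [insertBy_congr (fun a b => decide (k a < k b)) (fun a b => decide (k' a < k' b)) x acc
        (fun y hy => by simp only [hx, hacc y hy])]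
    exact ih _ (fun z hz => hxs z (by simp [hz]))
      (fun z hz => by
        rcases (PySem.List.mem_insertBy _ _ _ _).1 hz with rfl | hz'
        · exact hx
        · exact hacc z hz')

-- ===== VERDICT (by name: the statement is the Claim_ definition above) =====
theorem sort_alphabet_py_spec : Claim_equal_sort_alphabet_py := by
  intro prots showtarg_d _ _
  set d := PySem.Dict.ofList showtarg_d with hd
  set f : String → String := fun p => (d.getD p []).headD "" with hf
  simp only [Spec_sort_alphabet_py, sort_alphabet_py, sort_alphabet_py_alt, ← hd]
  -- A side: characterise the loop and push map through the sorts
  rw [loopA_char d prots [] []]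
  simp only [List.nil_append]
  unfold PySem.List.sorted PySem.List.sorted2
  simp only [if_neg (by decide : ¬ (false = true))]
  have mapA :
      (List.foldl (fun acc x => PySem.List.insertBy
          (fun a b => decide (pyNonesorter a.2 < pyNonesorter b.2)) x acc) []
          ((prots.filter (fun p => d.contains p)).map (fun p => (p, f p)))).map (fun r : String × String => r.1)
        = (prots.filter (fun p => d.contains p)).foldl
            (fun acc x => PySem.List.insertBy
              (fun a b => decide (pyNonesorter (f a) < pyNonesorter (f b))) x acc) [] := by
    have := foldl_insertBy_map (fun p => (p, f p))
        (fun a b : String × String => decide (pyNonesorter a.2 < pyNonesorter b.2))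
        (prots.filter (fun p => d.contains p)) []
    simp only [List.map_nil] at this
    rw [this, List.map_map]
    simp [Function.comp_def]
  have mapB :
      (List.foldl (fun acc x => PySem.List.insertBy
          (fun a b => decide (pyNonesorter a.2 < pyNonesorter b.2)) x acc) []
          ((prots.filter (fun p => !(d.contains p))).map (fun p => (p, p)))).map (fun r : String × String => r.1)
        = (prots.filter (fun p => !(d.contains p))).foldl
            (fun acc x => PySem.List.insertBy
              (fun a b => decide (pyNonesorter a < pyNonesorter b)) x acc) [] := by
    have := foldl_insertBy_map (fun p : String => (p, p))
        (fun a b : String × String => decide (pyNonesorter a.2 < pyNonesorter b.2))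
        (prots.filter (fun p => !(d.contains p))) []
    simp only [List.map_nil] at this
    rw [this, List.map_map]
    simp [Function.comp_def]
  rw [mapA, mapB]
  -- B side: split the composite sort
  have h01 : ∀ p : String, (if d.contains p then (0 : Int) else 1) = 0 ∨
      (if d.contains p then (0 : Int) else 1) = 1 := by
    intro p; by_cases h : d.contains p <;> simp [h]
  have split := foldl_insert2_split (fun p => if d.contains p then (0 : Int) else 1)
      (fun p => if d.contains p then pyOrEmpty (f p) else pyOrEmpty p) h01 prots [] []
      (by simp) (by simp)
  simp only [List.nil_append] at split
  rw [split]
  -- align the filters and the keys on each group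
  have hfil0 : prots.filter (fun p => (if d.contains p then (0 : Int) else 1) == 0)
      = prots.filter (fun p => d.contains p) := by
    apply List.filter_congr
    intro p _
    by_cases h : d.contains p <;> simp [h]
  have hfil1 : prots.filter (fun p => (if d.contains p then (0 : Int) else 1) == 1)
      = prots.filter (fun p => !(d.contains p)) := by
    apply List.filter_congr
    intro p _
    by_cases h : d.contains p <;> simp [h]
  rw [hfil0, hfil1]
  rw [foldl_insert_key_congr (fun p => if d.contains p then pyOrEmpty (f p) else pyOrEmpty p)
      (fun p => pyNonesorter (f p)) _ []
      (fun p hp => by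
        have : d.contains p = true := by simpa using (List.mem_filter.1 hp).2
        simp [this, pyOrEmpty, pyNonesorter])
      (by simp)]
  rw [foldl_insert_key_congr (fun p => if d.contains p then pyOrEmpty (f p) else pyOrEmpty p)
      (fun p => pyNonesorter p) _ []
      (fun p hp => by
        have : d.contains p = false := by simpa using (List.mem_filter.1 hp).2
        simp [this, pyOrEmpty, pyNonesorter])
      (by simp)]
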